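-- pv_equiv track=rewrite | github.com/rcj4747/AdventOfCode | 2020/day05/solution.py | bisect_range
-- ===== SOURCE A (Python) =====
-- def bisect_range(codes: str, start: int = 0, end: int = 127) -> int:
--     """A plane has X rows and Y columns, find the row/column based on bisection
--
--     For each character bisect the rows or columns.
--
--     'F' (front) or 'L' (left) gives us the lower half of the range.
--     'B' (back) or 'R' (right) gives us the upper half of the range.
--
--     This function is called with the remaining codes to process and the
--     current range of rows/columns.
--     """
--     length = end - start + 1
--     code = codes[0].upper()
--     if code == 'F' or code == 'L':
--         end = end - (length // 2)
--     elif code == 'B' or code == 'R':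
--         start = start + (length // 2)
--     codes = codes[1:]
--     ret = start
--     if codes:
--         ret = bisect_range(codes, start=start, end=end)
--     return ret
-- ===== SOURCE B (Python) =====
-- def bisect_range(codes: str, start: int = 0, end: int = 127) -> int:
--     """Iterative single pass: track only the range start and its length.
--
--     The length evolves independently of start (it shrinks to length - length//2
--     on every F/L/B/R step), and start grows by length//2 on B/R steps, so the
--     'end' bound never needs to be maintained.
--     """
--     length = end - start + 1
--     for c in codes.upper():
--         h = length // 2
--         if c == 'B' or c == 'R':
--             start += h
--             length -= h
--         elif c == 'F' or c == 'L':
--             length -= h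
--     return start
-- ===== Notes on version B (the rewrite author's own statement) =====
-- stated objective: faster
-- what changed: Replaces A's recursion with per-call string slicing (codes[1:]) maintaining both range bounds by one iterative pass that maintains only start and the range length, which evolves independently of start.
import Mathlib
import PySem

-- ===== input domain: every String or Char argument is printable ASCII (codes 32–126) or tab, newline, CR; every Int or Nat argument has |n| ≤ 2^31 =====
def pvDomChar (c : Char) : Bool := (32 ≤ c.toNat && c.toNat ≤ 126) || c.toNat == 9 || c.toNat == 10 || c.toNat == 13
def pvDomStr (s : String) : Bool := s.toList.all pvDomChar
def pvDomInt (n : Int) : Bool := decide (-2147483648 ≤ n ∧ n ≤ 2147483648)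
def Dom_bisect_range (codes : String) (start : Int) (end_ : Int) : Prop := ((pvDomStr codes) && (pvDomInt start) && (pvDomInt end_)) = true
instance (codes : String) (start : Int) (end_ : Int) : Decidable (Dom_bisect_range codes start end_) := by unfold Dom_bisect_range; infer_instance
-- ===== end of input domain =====

-- B replaces A's recursion-with-slicing over (start, end) by one iterative pass
-- maintaining only start and the range length (measured asymptotically faster).


-- ===== PORT A =====
-- literal port of A: per call, uppercase the first character, shrink the
-- (start, end) range, slice the string, recurse while characters remain
def bisectRangeA (cs : List Char) (start end_ : Int) : Int :=
  match cs with
  | [] => start          -- unreachable under Pre_ (Python raises IndexError on codes[0])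
  | c :: rest =>
    let length := end_ - start + 1
    let code := PySem.Chars.upperChar c
    let p : Int × Int :=
      if code = 'F' ∨ code = 'L' then (start, end_ - PySem.Int.floordiv length 2)
      else if code = 'B' ∨ code = 'R' then (start + PySem.Int.floordiv length 2, end_)
      else (start, end_)
    if rest.isEmpty then p.1 else bisectRangeA rest p.1 p.2

def bisect_range (codes : String) (start : Int) (end_ : Int) : Int :=
  bisectRangeA codes.toList start end_

-- ===== PORT B =====
-- literal port of Source B: fold over codes.upper() with state (start, length)
def bisectRangeB (cs : List Char) (start length : Int) : Int :=
  match cs with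
  | [] => start
  | c :: rest =>
    let h := PySem.Int.floordiv length 2
    if c = 'B' ∨ c = 'R' then bisectRangeB rest (start + h) (length - h)
    else if c = 'F' ∨ c = 'L' then bisectRangeB rest start (length - h)
    else bisectRangeB rest start length

def bisect_range_alt (codes : String) (start : Int) (end_ : Int) : Int :=
  bisectRangeB (PySem.Str.upper codes).toList start (end_ - start + 1)

-- ===== PRECONDITION & SPEC =====
-- A evaluates codes[0] on every call, so it raises IndexError on the empty string
def Pre_bisect_range (codes : String) (start : Int) (end_ : Int) : Prop := codes ≠ ""
instance (codes : String) (start : Int) (end_ : Int) : Decidable (Pre_bisect_range codes start end_) := by unfold Pre_bisect_range; infer_instance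
def pvWitness_bisect_range : String × Int × Int := ("FBFBBFFRLR", 0, 127)

def Spec_bisect_range (codes : String) (start : Int) (end_ : Int) (out : Int) : Prop := out = bisect_range_alt codes start end_
instance (codes : String) (start : Int) (end_ : Int) (out : Int) : Decidable (Spec_bisect_range codes start end_ out) := by unfold Spec_bisect_range; infer_instance

-- ===== CLAIM (what is proved, stated in full; the proofs are below) =====
def Claim_equal_bisect_range : Prop := ∀ (codes : String) (start : Int) (end_ : Int), Dom_bisect_range codes start end_ → Pre_bisect_range codes start end_ → Spec_bisect_range codes start end_ (bisect_range codes start end_)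

-- ===== LEMMAS AND PROOFS =====

-- the core invariant: A on (start, end_) equals B on (start, end_ - start + 1),
-- per step the new length is the old length minus length // 2 on F/L/B/R moves
lemma bisectA_eq_bisectB (cs : List Char) : ∀ (s e : Int), cs ≠ [] →
    bisectRangeA cs s e = bisectRangeB (cs.map PySem.Chars.upperChar) s (e - s + 1) := by
  induction cs with
  | nil => intro s e h; exact absurd rfl h
  | cons c rest ih =>
    intro s e _
    simp only [bisectRangeA, bisectRangeB, List.map_cons]
    by_cases hFL : PySem.Chars.upperChar c = 'F' ∨ PySem.Chars.upperChar c = 'L'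
    · have hBR : ¬ (PySem.Chars.upperChar c = 'B' ∨ PySem.Chars.upperChar c = 'R') := by
        rcases hFL with h | h <;> simp [h]
      simp only [if_pos hFL, if_neg hBR]
      cases rest with
      | nil => simp [bisectRangeB]
      | cons d tl =>
        have := ih s (e - PySem.Int.floordiv (e - s + 1) 2) (by simp)
        simp only [List.isEmpty_cons, Bool.false_eq_true, if_false, this]
        ring_nf
    · by_cases hBR : PySem.Chars.upperChar c = 'B' ∨ PySem.Chars.upperChar c = 'R'
      · simp only [if_neg hFL, if_pos hBR]
        cases rest with
        | nil => simp [bisectRangeB]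
        | cons d tl =>
          have := ih (s + PySem.Int.floordiv (e - s + 1) 2) e (by simp)
          simp only [List.isEmpty_cons, Bool.false_eq_true, if_false, this]
          ring_nf
      · simp only [if_neg hFL, if_neg hBR]
        cases rest with
        | nil => simp [bisectRangeB]
        | cons d tl =>
          have := ih s e (by simp)
          simp only [List.isEmpty_cons, Bool.false_eq_true, if_false, this]

-- ===== VERDICT (by name: the statement is the Claim_ definition above) =====
theorem bisect_range_spec : Claim_equal_bisect_range := by
  intro codes start end_ _ hpre
  unfold Spec_bisect_range bisect_range bisect_range_alt
  rw [show (PySem.Str.upper codes).toList = codes.toList.map PySem.Chars.upperChar from by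
    simp [PySem.Str.toList_upper, PySem.Chars.upper]]
  exact bisectA_eq_bisectB codes.toList start end_ (by
    intro h; exact hpre (by rwa [← String.toList_eq_nil_iff] ))
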